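-- pv_equiv track=rewrite | github.com/cjolivier01/HockeyMOM | src/hmlib/analytics/analyze_jerseys.py | reorder_jerseys_with_frames
-- ===== SOURCE A (Python) =====
-- from typing import Any, Dict, List, Set, Tuple, Union
--
-- def reorder_jerseys_with_frames(
--     jersey_numbers: List[int], frame_jersey_map: Dict[int, int]
-- ) -> Tuple[List[int], Dict[int, List[int]]]:
--     """
--     Reorders a list of jersey numbers based on the first occurrence of each jersey number by
--     increasing frame_id in the provided dictionary and returns a list of frames for each number.
--
--     Args:
--     jersey_numbers (List[int]): List of jersey numbers to reorder.
--     frame_jersey_map (Dict[int, int]): Dictionary with frame_id as keys and jersey_number as values.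
--
--     Returns:
--     Tuple[List[int], Dict[int, List[int]]]: A tuple containing the reordered list of jersey numbers
--                                            and a dictionary mapping each jersey number to a list of frames.
--     """
--     # Mapping from jersey numbers to their earliest frame_id
--     earliest_frames: Dict[int, int] = {}
--     # Mapping from jersey numbers to all their frame_ids
--     frames_per_jersey: Dict[int, List[int]] = {}
--
--     for frame_id, jersey_number in frame_jersey_map.items():
--         if jersey_number in earliest_frames:
--             earliest_frames[jersey_number] = min(earliest_frames[jersey_number], frame_id)
--         else:
--             earliest_frames[jersey_number] = frame_id
--
--         if jersey_number in frames_per_jersey: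
--             frames_per_jersey[jersey_number].append(frame_id)
--         else:
--             frames_per_jersey[jersey_number] = [frame_id]
--
--     # Sort the jersey numbers by the earliest frame_id
--     sorted_jerseys: List[Tuple[int, int]] = sorted(
--         ((jersey, frame) for jersey, frame in earliest_frames.items()), key=lambda x: x[1]
--     )
--
--     # Extract the sorted jersey numbers
--     sorted_jerseys_only: List[int] = [jersey for jersey, frame in sorted_jerseys]
--
--     # Filter the original jersey numbers to match the new order, maintaining the original frequency and order
--     jersey_order: Dict[int, int] = {jersey: idx for idx, jersey in enumerate(sorted_jerseys_only)}
--     final_sorted_jerseys: List[int] = sorted(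
--         (j for j in jersey_numbers if j in jersey_order), key=lambda x: jersey_order[x]
--     )
--
--     return final_sorted_jerseys, {
--         jersey: sorted(frames) for jersey, frames in frames_per_jersey.items()
--     }
-- ===== SOURCE B (Python) =====
-- from typing import Dict, List, Tuple
--
-- def reorder_jerseys_with_frames(
--     jersey_numbers: List[int], frame_jersey_map: Dict[int, int]
-- ) -> Tuple[List[int], Dict[int, List[int]]]:
--     # Group all frames by jersey in one pass (insertion order = first occurrence).
--     frames_per_jersey: Dict[int, List[int]] = {}
--     for frame_id, jersey_number in frame_jersey_map.items():
--         frames_per_jersey.setdefault(jersey_number, []).append(frame_id)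
--
--     # Jerseys ordered by their earliest frame (= min of their frame list).
--     order: List[int] = sorted(frames_per_jersey, key=lambda j: min(frames_per_jersey[j]))
--
--     # Count each jersey once, then expand in order -- no sort of jersey_numbers.
--     counts: Dict[int, int] = {}
--     for j in jersey_numbers:
--         counts[j] = counts.get(j, 0) + 1
--
--     final: List[int] = [j for j in order for _ in range(counts.get(j, 0))]
--     return final, {j: sorted(fs) for j, fs in frames_per_jersey.items()}
-- ===== Notes on version B (the rewrite author's own statement) =====
-- stated objective: alternative
-- what changed: One grouping pass replaces the two parallel dicts (the earliest frame is recovered as the min of each group), and the final list is produced by counting jersey_numbers once and expanding each jersey of the earliest-frame order count times, eliminating the rank dict and the stable sort of jersey_numbers.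
import Mathlib
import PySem

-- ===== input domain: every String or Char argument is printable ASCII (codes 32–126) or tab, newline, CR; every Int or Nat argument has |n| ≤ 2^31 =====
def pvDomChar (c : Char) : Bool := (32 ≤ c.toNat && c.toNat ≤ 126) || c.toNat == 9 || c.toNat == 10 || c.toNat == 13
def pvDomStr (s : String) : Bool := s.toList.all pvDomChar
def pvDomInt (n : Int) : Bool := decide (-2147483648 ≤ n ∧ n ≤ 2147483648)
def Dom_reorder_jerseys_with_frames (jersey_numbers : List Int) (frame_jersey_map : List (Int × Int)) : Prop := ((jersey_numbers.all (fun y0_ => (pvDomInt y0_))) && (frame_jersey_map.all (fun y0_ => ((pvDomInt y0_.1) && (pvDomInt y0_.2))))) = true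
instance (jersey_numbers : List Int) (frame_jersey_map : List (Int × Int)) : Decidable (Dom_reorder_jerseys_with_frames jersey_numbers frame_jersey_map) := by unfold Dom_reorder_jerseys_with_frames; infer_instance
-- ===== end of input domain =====

-- B replaces the two parallel dicts and the stable sort of jersey_numbers by one
-- grouping pass plus count-and-expand over the earliest-frame order (alternative algorithm).

-- ===== PORT A =====
def reorder_jerseys_with_frames (jersey_numbers : List Int) (frame_jersey_map : List (Int × Int)) : List Int × (List (Int × List Int)) :=
  let d := PySem.Dict.ofList frame_jersey_map
  -- the single loop filling earliest_frames (first state component) and frames_per_jersey (second)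
  let st := d.items.foldl
    (fun (s : PySem.Dict Int Int × PySem.Dict Int (List Int)) p =>
      (if s.1.contains p.2 then s.1.insert p.2 (min (s.1.getD p.2 0) p.1) else s.1.insert p.2 p.1,
       if s.2.contains p.2 then s.2.modify p.2 [] (· ++ [p.1]) else s.2.insert p.2 [p.1]))
    (PySem.Dict.empty, PySem.Dict.empty)
  let sorted_jerseys := PySem.List.sorted st.1.items (fun x => x.2)
  let sorted_jerseys_only := sorted_jerseys.map (fun x => x.1)
  let jersey_order := (PySem.List.enumerate sorted_jerseys_only).foldl
    (fun (d : PySem.Dict Int Int) p => d.insert p.2 p.1) PySem.Dict.empty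
  let final_sorted_jerseys := PySem.List.sorted
    (jersey_numbers.filter (fun j => jersey_order.contains j)) (fun j => jersey_order.getD j 0)
  (final_sorted_jerseys, st.2.items.map (fun p => (p.1, PySem.List.sorted p.2 (fun x => x))))

-- ===== PORT B =====
def reorder_jerseys_with_frames_alt (jersey_numbers : List Int) (frame_jersey_map : List (Int × Int)) : List Int × (List (Int × List Int)) :=
  let d := PySem.Dict.ofList frame_jersey_map
  -- one grouping pass: frames_per_jersey.setdefault(j, []).append(f)
  let frames := d.items.foldl
    (fun (fr : PySem.Dict Int (List Int)) p => fr.modify p.2 [] (· ++ [p.1])) PySem.Dict.empty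
  -- min(frames_per_jersey[j]) : the group list is never empty for a key, so minD is exact here
  let order := PySem.List.sorted frames.keys
    (fun j => PySem.List.minD (frames.getD j []) (fun x => x) 0)
  let counts := jersey_numbers.foldl
    (fun (c : PySem.Dict Int Int) j => c.insert j (c.getD j 0 + 1)) PySem.Dict.empty
  let final := order.flatMap (fun j => List.replicate (counts.getD j 0).toNat j)
  (final, frames.items.map (fun p => (p.1, PySem.List.sorted p.2 (fun x => x))))

-- ===== PRECONDITION & SPEC =====
def Spec_reorder_jerseys_with_frames (jersey_numbers : List Int) (frame_jersey_map : List (Int × Int)) (out : List Int × (List (Int × List Int))) : Prop := out = reorder_jerseys_with_frames_alt jersey_numbers frame_jersey_map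
instance (jersey_numbers : List Int) (frame_jersey_map : List (Int × Int)) (out : List Int × (List (Int × List Int))) : Decidable (Spec_reorder_jerseys_with_frames jersey_numbers frame_jersey_map out) := by unfold Spec_reorder_jerseys_with_frames; infer_instance

-- ===== CLAIM (what is proved, stated in full; the proofs are below) =====
def Claim_equal_reorder_jerseys_with_frames : Prop := ∀ (jersey_numbers : List Int) (frame_jersey_map : List (Int × Int)), Dom_reorder_jerseys_with_frames jersey_numbers frame_jersey_map → Spec_reorder_jerseys_with_frames jersey_numbers frame_jersey_map (reorder_jerseys_with_frames jersey_numbers frame_jersey_map)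

-- ===== LEMMAS AND PROOFS =====

-- proof-side abbreviations
def pvStepE (d : PySem.Dict Int Int) (p : Int × Int) : PySem.Dict Int Int :=
  if d.contains p.2 then d.insert p.2 (min (d.getD p.2 0) p.1) else d.insert p.2 p.1

def pvFr (l : List (Int × Int)) : PySem.Dict Int (List Int) :=
  l.foldl (fun fr p => fr.modify p.2 [] (· ++ [p.1])) PySem.Dict.empty

def pvFs (l : List (Int × Int)) (j : Int) : List Int :=
  (l.filter (fun p => p.2 == j)).map (fun p => p.1)

def pvMkey (l : List (Int × Int)) (j : Int) : Int :=
  PySem.List.minD (pvFs l j) (fun x => x) 0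

def pvGStep (o : Option Int) (f : Int) : Option Int :=
  some (match o with | none => f | some e => min e f)

lemma pvStepF_eq (s : PySem.Dict Int (List Int)) (p : Int × Int) :
    (if s.contains p.2 then s.modify p.2 [] (· ++ [p.1]) else s.insert p.2 [p.1])
      = s.modify p.2 [] (· ++ [p.1]) := by
  by_cases h : s.contains p.2 = true
  · simp [h]
  · simp only [Bool.not_eq_true] at h
    simp [h, PySem.Dict.modify, PySem.Dict.getD_of_not_contains _ _ h]

lemma pvRunMin_mem (rest : List Int) (f0 : Int) : rest.foldl min f0 ∈ f0 :: rest := by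
  induction rest generalizing f0 with
  | nil => simp
  | cons x xs ih =>
    rw [List.foldl_cons]
    rcases List.mem_cons.mp (ih (min f0 x)) with h | h
    · rw [h]
      rcases le_total f0 x with hle | hle
      · rw [min_eq_left hle]; simp
      · rw [min_eq_right hle]; simp
    · simp [h]

lemma pvRunMin_le (rest : List Int) : ∀ (f0 : Int), ∀ y ∈ f0 :: rest, rest.foldl min f0 ≤ y := by
  induction rest with
  | nil => intro f0 y hy; simp at hy; simp [hy]
  | cons x xs ih =>
    intro f0 y hy
    rw [List.foldl_cons]
    rcases List.mem_cons.mp hy with rfl | hy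
    · exact le_trans (ih (min y x) (min y x) (by simp)) (min_le_left _ _)
    · rcases List.mem_cons.mp hy with rfl | hy
      · exact le_trans (ih (min f0 y) (min f0 y) (by simp)) (min_le_right _ _)
      · exact ih (min f0 x) y (List.mem_cons_of_mem _ hy)

lemma pvMinD_cons (f0 : Int) (rest : List Int) :
    PySem.List.minD (f0 :: rest) (fun x => x) 0 = rest.foldl min f0 := by
  rcases h : PySem.List.min? (f0 :: rest) (fun x => x) with _ | m
  · exact absurd ((PySem.List.min?_eq_none_iff _ _).mp h) (by simp)
  · have hmem := PySem.List.min?_mem h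
    have hmin := PySem.List.min?_isMin h
    have h1 : m ≤ rest.foldl min f0 := hmin _ (pvRunMin_mem rest f0)
    have h2 : rest.foldl min f0 ≤ m := pvRunMin_le rest f0 m hmem
    simp [PySem.List.minD, h, le_antisymm h1 h2]

lemma pvG_some (fs : List Int) (e : Int) :
    fs.foldl pvGStep (some e) = some (fs.foldl min e) := by
  induction fs generalizing e with
  | nil => rfl
  | cons x xs ih => simp [List.foldl_cons, pvGStep, ih]

lemma pvE_get (l : List (Int × Int)) (d : PySem.Dict Int Int) (j : Int) :
    (l.foldl pvStepE d).get? j = (pvFs l j).foldl pvGStep (d.get? j) := by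
  induction l generalizing d with
  | nil => rfl
  | cons p l ih =>
    rw [List.foldl_cons, ih]
    by_cases hpj : p.2 = j
    · subst hpj
      have hfs : pvFs (p :: l) p.2 = p.1 :: pvFs l p.2 := by simp [pvFs]
      rw [hfs, List.foldl_cons]
      congr 1
      rcases hg : d.get? p.2 with _ | e
      · have hc : d.contains p.2 = false := by
          rw [PySem.Dict.contains_eq_isSome_get?, hg]; rfl
        simp [pvStepE, hc, PySem.Dict.get?_insert_self, pvGStep]
      · have hc : d.contains p.2 = true := by
          rw [PySem.Dict.contains_eq_isSome_get?, hg]; rfl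
        have hgd : d.getD p.2 0 = e := by rw [PySem.Dict.getD_eq_get?_getD, hg]; rfl
        simp [pvStepE, hc, hgd, PySem.Dict.get?_insert_self, pvGStep]
    · have hfs : pvFs (p :: l) j = pvFs l j := by simp [pvFs, hpj]
      rw [hfs]
      congr 1
      unfold pvStepE
      split
      · exact PySem.Dict.get?_insert_of_ne _ _ (fun h => hpj h.symm)
      · exact PySem.Dict.get?_insert_of_ne _ _ (fun h => hpj h.symm)

lemma pvFr_getD (l : List (Int × Int)) (j : Int) : (pvFr l).getD j [] = pvFs l j := by
  have hmap : pvFr l = (l.map (fun p => (p.2, p.1))).foldl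
      (fun d q => d.modify q.1 [] (· ++ [q.2])) PySem.Dict.empty := by
    rw [List.foldl_map]
    rfl
  rw [hmap, PySem.Dict.getD_foldl_modify_append]
  simp [pvFs, List.filter_map, Function.comp_def, List.map_map]

lemma pvStepE_insert : pvStepE = fun d p =>
    d.insert p.2 (if d.contains p.2 then min (d.getD p.2 0) p.1 else p.1) := by
  funext d p
  unfold pvStepE
  split <;> simp_all

lemma pvE_keys (l : List (Int × Int)) :
    (l.foldl pvStepE PySem.Dict.empty).keys = (pvFr l).keys := by
  rw [pvStepE_insert]
  rw [PySem.Dict.keys_foldl_insert_key l (fun p => p.2)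
    (fun d p => if d.contains p.2 then min (d.getD p.2 0) p.1 else p.1)]
  rw [pvFr, PySem.Dict.keys_foldl_modify_key l (fun p => p.2) [] (fun _ p => (· ++ [p.1]))]
  rfl

lemma pvFr_keys_nodup (l : List (Int × Int)) : (pvFr l).keys.Nodup :=
  PySem.Dict.nodup_keys_foldl_modify_key l (fun p => p.2) [] (fun _ p => (· ++ [p.1]))
    PySem.Dict.empty PySem.Dict.nodup_keys_empty

lemma pvE_keys_nodup (l : List (Int × Int)) :
    (l.foldl pvStepE PySem.Dict.empty).keys.Nodup := by
  rw [pvStepE_insert]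
  exact PySem.Dict.nodup_keys_foldl_insert_key l (fun p => p.2) _ PySem.Dict.empty
    PySem.Dict.nodup_keys_empty

lemma pvFr_mem_keys (l : List (Int × Int)) (j : Int) :
    j ∈ (pvFr l).keys ↔ j ∈ l.map (fun p => p.2) := by
  rw [pvFr, PySem.Dict.keys_foldl_modify_key l (fun p => p.2) [] (fun _ p => (· ++ [p.1]))]
  rw [PySem.Dict.keys_empty]
  exact PySem.Set.mem_ofList _ _

lemma pvFs_ne_nil (l : List (Int × Int)) (j : Int) (h : j ∈ l.map (fun p => p.2)) :
    pvFs l j ≠ [] := by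
  rcases List.mem_map.mp h with ⟨p, hp, rfl⟩
  simp only [pvFs, ne_eq, List.map_eq_nil_iff, List.filter_eq_nil_iff]
  intro hall
  exact hall p hp (by simp)

lemma pvE_getD (l : List (Int × Int)) (j : Int) (h : j ∈ (pvFr l).keys) :
    (l.foldl pvStepE PySem.Dict.empty).getD j 0 = pvMkey l j := by
  have hne := pvFs_ne_nil l j ((pvFr_mem_keys l j).mp h)
  rcases hfs : pvFs l j with _ | ⟨f0, rest⟩
  · exact absurd hfs hne
  · rw [PySem.Dict.getD_eq_get?_getD, pvE_get, PySem.Dict.get?_empty, hfs,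
      List.foldl_cons]
    have : pvGStep none f0 = some f0 := rfl
    rw [this, pvG_some]
    rw [pvMkey, hfs, pvMinD_cons]
    rfl

lemma pvE_items (l : List (Int × Int)) :
    (l.foldl pvStepE PySem.Dict.empty).items
      = (pvFr l).keys.map (fun j => (j, pvMkey l j)) := by
  rw [PySem.Dict.items_eq_map_keys _ (pvE_keys_nodup l) 0, pvE_keys]
  exact List.map_congr_left (fun j hj => by rw [pvE_getD l j hj])

def pvOrder (l : List (Int × Int)) : List Int :=
  PySem.List.sorted (pvFr l).keys (fun j => pvMkey l j)

lemma pvOrder_perm (l : List (Int × Int)) : (pvOrder l).Perm (pvFr l).keys :=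
  PySem.List.sorted_perm _ _ _

lemma pvOrder_nodup (l : List (Int × Int)) : (pvOrder l).Nodup :=
  ((pvOrder_perm l).nodup_iff).mpr (pvFr_keys_nodup l)

lemma pvMkey_mem (l : List (Int × Int)) (j : Int) (h : pvFs l j ≠ []) :
    pvMkey l j ∈ pvFs l j := by
  rcases hfs : pvFs l j with _ | ⟨f0, rest⟩
  · exact absurd hfs h
  · rw [pvMkey, hfs, pvMinD_cons]
    exact hfs ▸ pvRunMin_mem rest f0

lemma pvMkey_inj (l : List (Int × Int)) (hnd : (l.map (fun p => p.1)).Nodup) :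
    ∀ j ∈ (pvFr l).keys, ∀ j' ∈ (pvFr l).keys, pvMkey l j = pvMkey l j' → j = j' := by
  intro j hj j' hj' heq
  have h1 := pvMkey_mem l j (pvFs_ne_nil l j ((pvFr_mem_keys l j).mp hj))
  have h2 := pvMkey_mem l j' (pvFs_ne_nil l j' ((pvFr_mem_keys l j').mp hj'))
  rcases List.mem_map.mp h1 with ⟨p, hpf, hp1⟩
  rcases List.mem_map.mp h2 with ⟨q, hqf, hq1⟩
  have hpl := List.mem_of_mem_filter hpf
  have hql := List.mem_of_mem_filter hqf
  have hpj : p.2 = j := by simpa using List.of_mem_filter hpf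
  have hqj : q.2 = j' := by simpa using List.of_mem_filter hqf
  have : p = q := List.inj_on_of_nodup_map hnd hpl hql (by rw [hp1, hq1, heq])
  rw [← hpj, ← hqj, this]

lemma pvMkey_pairwise_lt (l : List (Int × Int)) (hnd : (l.map (fun p => p.1)).Nodup) :
    (pvOrder l).Pairwise (fun a b => pvMkey l a < pvMkey l b) := by
  rw [List.pairwise_iff_getElem]
  intro i k hi hk hik
  have hle : pvMkey l (pvOrder l)[i] ≤ pvMkey l (pvOrder l)[k] :=
    PySem.List.key_sorted_getElem_mono (pvFr l).keys (fun j => pvMkey l j) (le_of_lt hik) hk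
  have hne : (pvOrder l)[i] ≠ (pvOrder l)[k] := by
    intro h
    exact absurd (((pvOrder_nodup l).getElem_inj_iff).mp h) (Nat.ne_of_lt hik)
  have hmemi : (pvOrder l)[i] ∈ (pvFr l).keys :=
    (pvOrder_perm l).mem_iff.mp (List.getElem_mem hi)
  have hmemk : (pvOrder l)[k] ∈ (pvFr l).keys :=
    (pvOrder_perm l).mem_iff.mp (List.getElem_mem hk)
  exact lt_of_le_of_ne hle
    (fun h => hne (pvMkey_inj l hnd _ hmemi _ hmemk h))

lemma pvSortedE (l : List (Int × Int)) (hnd : (l.map (fun p => p.1)).Nodup) :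
    PySem.List.sorted (l.foldl pvStepE PySem.Dict.empty).items (fun x => x.2)
      = (pvOrder l).map (fun j => (j, pvMkey l j)) := by
  apply PySem.List.sorted_eq_of_perm_of_pairwise_lt
  · rw [pvE_items]
    exact (pvOrder_perm l).map _
  · rw [List.pairwise_map]
    exact pvMkey_pairwise_lt l hnd

-- jersey_order
def pvJo (os : List Int) : PySem.Dict Int Int :=
  (PySem.List.enumerate os).foldl (fun d p => d.insert p.2 p.1) PySem.Dict.empty

lemma pvJo_items (os : List Int) (hnd : os.Nodup) :
    (pvJo os).items = (PySem.List.enumerate os).map (fun p => (p.2, p.1)) := by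
  rw [pvJo, PySem.Dict.items_foldl_insert_fresh (PySem.List.enumerate os)
    (fun p => p.2) (fun p => p.1) PySem.Dict.empty
    (fun a _ => PySem.Dict.contains_empty _)
    (by rw [PySem.List.map_snd_enumerate]; exact hnd)]
  rfl

lemma pvJo_keys (os : List Int) (hnd : os.Nodup) : (pvJo os).keys = os := by
  have : (pvJo os).keys = (pvJo os).items.map (fun p => p.1) := rfl
  rw [this, pvJo_items os hnd, List.map_map]
  exact PySem.List.map_snd_enumerate os 0

lemma pvJo_getD (os : List Int) (hnd : os.Nodup) (i : Nat) (hi : i < os.length) :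
    (pvJo os).getD os[i] 0 = (i : Int) := by
  have hmem : ((os[i] : Int), (i : Int)) ∈ (pvJo os).items := by
    rw [pvJo_items os hnd]
    refine List.mem_map.mpr ⟨((i : Int), os[i]), ?_, rfl⟩
    rw [PySem.List.mem_enumerate_iff]
    exact ⟨i, hi, by simp⟩
  exact PySem.Dict.getD_of_mem_items _ hmem (by rw [pvJo_keys os hnd]; exact hnd) 0

lemma pvJo_contains (os : List Int) (hnd : os.Nodup) (j : Int) :
    (pvJo os).contains j = decide (j ∈ os) := by
  rw [PySem.Dict.contains_eq_decide_mem_keys, pvJo_keys os hnd]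

-- uniqueness of an ordered arrangement under an injective-on-elements key
lemma pvEqOfPerm (key : Int → Int) : ∀ (l₁ l₂ : List Int), l₁.Perm l₂ →
    l₁.Pairwise (fun a b => key a ≤ key b) → l₂.Pairwise (fun a b => key a ≤ key b) →
    (∀ x ∈ l₁, ∀ y ∈ l₁, key x = key y → x = y) → l₁ = l₂ := by
  intro l₁
  induction l₁ with
  | nil =>
    intro l₂ hp _ _ _
    exact (hp.symm.eq_nil).symm
  | cons a t ih =>
    intro l₂ hp h1 h2 hinj
    cases l₂ with
    | nil => simpa using hp.length_eq
    | cons b u =>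
      have hbmem : b ∈ a :: t := hp.mem_iff.mpr (by simp)
      have hamem : a ∈ b :: u := hp.mem_iff.mp (by simp)
      have hab : a = b := by
        have h1' : key a ≤ key b := by
          rcases List.mem_cons.mp hbmem with rfl | hb
          · exact le_rfl
          · exact List.rel_of_pairwise_cons h1 hb
        have h2' : key b ≤ key a := by
          rcases List.mem_cons.mp hamem with rfl | ha
          · exact le_rfl
          · exact List.rel_of_pairwise_cons h2 ha
        exact hinj a (by simp) b hbmem (le_antisymm h1' h2')
      subst hab
      have ht : t.Perm u := hp.cons_inv
      rw [ih u ht h1.of_cons h2.of_cons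
        (fun x hx y hy => hinj x (List.mem_cons_of_mem _ hx) y (List.mem_cons_of_mem _ hy))]

lemma pvCountFlat (jn : List Int) : ∀ (os : List Int), os.Nodup → ∀ (c : Int),
    (os.flatMap (fun j => List.replicate (jn.count j) j)).count c
      = if c ∈ os then jn.count c else 0 := by
  intro os
  induction os with
  | nil => intro _ c; simp
  | cons o os ih =>
    intro hnd c
    rw [List.flatMap_cons, List.count_append, List.count_replicate,
      ih hnd.of_cons c]
    by_cases hco : c = o
    · subst hco
      have hnotin : c ∉ os := (List.nodup_cons.mp hnd).1
      simp [hnotin]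
    · have hoc : o ≠ c := fun h => hco h.symm
      simp [hco, hoc]

lemma pvCountFilter (jn : List Int) (p : Int → Bool) (c : Int) :
    (jn.filter p).count c = if p c then jn.count c else 0 := by
  by_cases hp : p c
  · rw [List.count_filter hp]; simp [hp]
  · have h0 : (jn.filter p).count c = 0 :=
      List.count_eq_zero.mpr (fun hmem => absurd (List.of_mem_filter hmem) (by simp [hp]))
    simp [hp, h0]

lemma pvPairwiseFlat (key : Int → Int) (n : Int → Nat) : ∀ (os : List Int),
    os.Pairwise (fun a b => key a ≤ key b) →
    (os.flatMap (fun j => List.replicate (n j) j)).Pairwise (fun a b => key a ≤ key b) := by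
  intro os
  induction os with
  | nil => intro _; simp
  | cons o os ih =>
    intro hpw
    rw [List.flatMap_cons, List.pairwise_append]
    refine ⟨List.pairwise_replicate.mpr (Or.inr le_rfl), ih hpw.of_cons, ?_⟩
    intro x hx y hy
    rcases List.mem_flatMap.mp hy with ⟨j, hj, hyj⟩
    rw [(List.mem_replicate.mp hx).2, (List.mem_replicate.mp hyj).2]
    exact List.rel_of_pairwise_cons hpw hj

lemma pvCounts_toNat (jn : List Int) (j : Int) :
    ((jn.foldl (fun (c : PySem.Dict Int Int) j => c.insert j (c.getD j 0 + 1))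
      PySem.Dict.empty).getD j 0).toNat = jn.count j := by
  rw [PySem.Dict.getD_foldl_insert_add_one]
  simp [PySem.Dict.getD_empty]

lemma pvFinal (jn os : List Int) (hnd : os.Nodup) :
    PySem.List.sorted (jn.filter (fun j => (pvJo os).contains j))
        (fun j => (pvJo os).getD j 0)
      = os.flatMap (fun j => List.replicate (jn.count j) j) := by
  apply pvEqOfPerm (fun j => (pvJo os).getD j 0)
  · refine (PySem.List.sorted_perm _ _ _).trans ?_
    rw [List.perm_iff_count]
    intro c
    rw [pvCountFilter, pvCountFlat jn os hnd c, pvJo_contains os hnd c]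
    by_cases hc : c ∈ os <;> simp [hc]
  · exact PySem.List.sorted_pairwise _ _
  · apply pvPairwiseFlat
    rw [List.pairwise_iff_getElem]
    intro i k hi hk hik
    rw [pvJo_getD os hnd i hi, pvJo_getD os hnd k hk]
    exact_mod_cast le_of_lt hik
  · intro x hx y hy hxy
    have hx' : x ∈ os := by
      have hm := (PySem.List.mem_sorted _ _ _ x).mp hx
      have hcon := List.of_mem_filter hm
      rw [pvJo_contains os hnd x] at hcon
      exact of_decide_eq_true hcon
    have hy' : y ∈ os := by
      have hm := (PySem.List.mem_sorted _ _ _ y).mp hy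
      have hcon := List.of_mem_filter hm
      rw [pvJo_contains os hnd y] at hcon
      exact of_decide_eq_true hcon
    rcases List.mem_iff_getElem.mp hx' with ⟨i, hi, rfl⟩
    rcases List.mem_iff_getElem.mp hy' with ⟨k, hk, rfl⟩
    rw [pvJo_getD os hnd i hi, pvJo_getD os hnd k hk] at hxy
    have : i = k := by exact_mod_cast hxy
    subst this
    rfl

lemma pvMain (jn : List Int) (fm : List (Int × Int)) :
    reorder_jerseys_with_frames jn fm = reorder_jerseys_with_frames_alt jn fm := by
  unfold reorder_jerseys_with_frames reorder_jerseys_with_frames_alt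
  dsimp only
  set l := (PySem.Dict.ofList fm).items with hl
  have hnd : (l.map (fun p => p.1)).Nodup := PySem.Dict.nodup_keys_ofList fm
  -- split the paired fold of A into its two independent folds
  rw [PySem.List.foldl_prod_mk
    (fun (d : PySem.Dict Int Int) (p : Int × Int) =>
      if d.contains p.2 then d.insert p.2 (min (d.getD p.2 0) p.1) else d.insert p.2 p.1)
    (fun (d : PySem.Dict Int (List Int)) (p : Int × Int) =>
      if d.contains p.2 then d.modify p.2 [] (· ++ [p.1]) else d.insert p.2 [p.1])
    l PySem.Dict.empty PySem.Dict.empty]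
  -- A's frames loop is B's grouping loop
  have hF : (fun (d : PySem.Dict Int (List Int)) (p : Int × Int) =>
      if d.contains p.2 then d.modify p.2 [] (· ++ [p.1]) else d.insert p.2 [p.1])
      = (fun (d : PySem.Dict Int (List Int)) (p : Int × Int) => d.modify p.2 [] (· ++ [p.1])) :=
    funext fun d => funext fun p => pvStepF_eq d p
  rw [hF]
  have hE : (fun (d : PySem.Dict Int Int) (p : Int × Int) =>
      if d.contains p.2 then d.insert p.2 (min (d.getD p.2 0) p.1) else d.insert p.2 p.1)
      = pvStepE := rfl
  rw [hE]
  have hfr : l.foldl (fun (d : PySem.Dict Int (List Int)) (p : Int × Int) =>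
      d.modify p.2 [] (· ++ [p.1])) PySem.Dict.empty = pvFr l := rfl
  rw [hfr]
  -- B's sort key is pvMkey
  have hkey : (fun j => PySem.List.minD ((pvFr l).getD j []) (fun x => x) 0)
      = fun j => pvMkey l j := funext fun j => by rw [pvFr_getD]; rfl
  rw [hkey]
  -- A's sorted earliest items, projected, is B's order
  rw [pvSortedE l hnd]
  have honly : ((pvOrder l).map (fun j => (j, pvMkey l j))).map (fun x => x.1) = pvOrder l := by
    rw [List.map_map, show ((fun (x : Int × Int) => x.1) ∘ fun j => (j, pvMkey l j)) = id from rfl,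
      List.map_id]
  rw [honly]
  -- counts expand to occurrence counts
  simp only [pvCounts_toNat]
  -- the final list
  have hjo : List.foldl (fun (d : PySem.Dict Int Int) (p : Int × Int) => d.insert p.2 p.1)
      PySem.Dict.empty (PySem.List.enumerate (pvOrder l)) = pvJo (pvOrder l) := rfl
  rw [hjo, pvFinal jn (pvOrder l) (pvOrder_nodup l)]
  rfl

-- ===== VERDICT (by name: the statement is the Claim_ definition above) =====
theorem reorder_jerseys_with_frames_spec : Claim_equal_reorder_jerseys_with_frames := by
  intro jersey_numbers frame_jersey_map _
  unfold Spec_reorder_jerseys_with_frames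
  exact pvMain jersey_numbers frame_jersey_map
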